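-- pv_equiv track=rewrite | github.com/MikaSchaechinger/ParameterInterpreter | src/parameter_interpreter.py | __modifyArgList
-- ===== SOURCE A (Python) =====
-- def split_string_at_indexes(string, indexes):
--     substrings = []
--     previous_index = 0
--
--     for index in indexes:
--         substrings.append(string[previous_index:index])
--         previous_index = index + 1
--
--     substrings.append(string[previous_index:])
--
--     return substrings
--
-- class ParameterException(Exception):
--     pass
--
-- def __modifyArgList(argList):
--     if len(argList) > 0:    # new if case by Mika S.  14.12.2022
--         last_arg = argList[-1]
--         if ',' in last_arg:
--             # new 01.07.2023 Mika S.
--             # split at each ',', which is not in brackets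
--             split_index_list = [] # list contains indexes with ',', where the string should be splitted
--             bracket_counter = 0
--             for index, character in enumerate(last_arg):
--                 if character == '(':
--                     bracket_counter += 1
--                 elif character == ')':
--                     bracket_counter -= 1
--                 if character == ',' and bracket_counter == 0:
--                     split_index_list.append(index)
--
--                 if bracket_counter < 0:
--                     raise ParameterException(f"Error: There were more closing brackets then opening brackets")
--
--             endArgsList = split_string_at_indexes(last_arg, split_index_list)
--
--             #endArgsList = argList[-1].split(',')   # old
--             argList = argList[:-1]
--             for arg in endArgsList:
--                 if arg != '':
--                     argList.append(arg)
--
--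
--     insertDict = {}
--     replaceArg = False
--     highestKey = 0
--
--     for i, arg in enumerate(argList):
--
--         if arg[0] == '%':
--             number = arg[1:]
--             if number.isdigit():
--                 number = int(number)
--                 replaceArg = True
--                 if number in insertDict:
--                     text = f'There was a duplicated placeholder "%{number}"'
--                     raise ParameterException(text)
--                 insertDict[number] = i
--                 if number < 0:
--                     text = f'Placholder {i} ({arg}) Number was interpreted as {number}, but must be greather then zero!'
--                     raise ParameterException(text)
--                 if number > highestKey:
--                     highestKey = number
--             else:
--                 text = f'Argument {i} ({arg}) is a Placeholder, but has no number'
--                 raise ParameterException(text)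
--
--     if not replaceArg:
--         return argList
--
--     if len(insertDict) != highestKey + 1:   # +1 because: highestKey starts with 0, len with 1
--         text = f'The highest replace Number was {highestKey} (starting with 0, there must be {highestKey+1}), but only {len(insertDict)} were detected!\n\t\tDetected %Numbers are {insertDict.keys()}'
--         raise ParameterException(text)
--
--     if highestKey > (len(argList)-1)*2:  # -1 because one element is the programm Name; *2 because every replacement needs two ars
--         text = f'There are {len(argList)-1} arguments and the highest replace number is {highestKey}. Each replace Argument needs a Argument at the End.'
--         raise ParameterException(text)
--
--     splitIndex = len(argList)-(highestKey+1)
--     insertList = argList[splitIndex:].copy()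
--     argList = argList[:splitIndex]
--
--
--     try:
--         for argIndex, insertIndex in insertDict.items():
--             argList[insertIndex] = insertList[argIndex]
--     except IndexError:
--         text = f'IndexError: argList[insertIndex] = insertList[argIndex]\n\tThere were missing Arguments at the end ({highestKey+1} are required, last {highestKey+1} are: {insertList})'
--         raise ParameterException(text)
--     return argList
-- ===== SOURCE B (Python) =====
-- class ParameterException(Exception):
--     pass
--
--
-- def _split_top_level(s):
--     """Split s at each comma that is not inside brackets, one streaming pass."""
--     segments = []
--     buf = ''
--     depth = 0
--     for ch in s:
--         if ch == ',' and depth == 0: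
--             segments.append(buf)
--             buf = ''
--             continue
--         if ch == '(':
--             depth += 1
--         elif ch == ')':
--             depth -= 1
--             if depth < 0:
--                 raise ParameterException("Error: There were more closing brackets then opening brackets")
--         buf += ch
--     segments.append(buf)
--     return segments
--
--
-- def __modifyArgList(argList):
--     if len(argList) > 0 and ',' in argList[-1]:
--         segments = _split_top_level(argList[-1])
--         argList = argList[:-1] + [seg for seg in segments if seg != '']
--
--     pairs = []  # (placeholder number, position), in order of appearance
--     for i, arg in enumerate(argList):
--         if arg[0] == '%':
--             num = arg[1:]
--             if not num.isdigit():
--                 raise ParameterException(f'Argument {i} ({arg}) is a Placeholder, but has no number')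
--             pairs.append((int(num), i))
--
--     if not pairs:
--         return argList
--
--     nums = [n for n, _ in pairs]
--     if len(set(nums)) != len(nums):
--         raise ParameterException('There was a duplicated placeholder')
--     highest = max(nums)
--     if len(nums) != highest + 1:
--         raise ParameterException(f'The highest replace Number was {highest}, but only {len(nums)} were detected!')
--     if highest > (len(argList) - 1) * 2:
--         raise ParameterException('Each replace Argument needs a Argument at the End.')
--
--     split = len(argList) - (highest + 1)
--     tail = argList[split:]
--     pos_to_num = {i: n for n, i in pairs}
--     return [tail[pos_to_num[i]] if i in pos_to_num else argList[i] for i in range(split)]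
-- ===== Notes on version B (the rewrite author's own statement) =====
-- stated objective: alternative
-- what changed: B fuses A's two-pass splitter (collect comma indexes, then slice between them) into one streaming bracket-depth pass with a segment buffer, and replaces A's dict/flag/running-max accumulation plus try/except in-place substitution loop by building a (number, position) pair list that is validated with set/max and used to rebuild the output with a single comprehension.
import Mathlib
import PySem

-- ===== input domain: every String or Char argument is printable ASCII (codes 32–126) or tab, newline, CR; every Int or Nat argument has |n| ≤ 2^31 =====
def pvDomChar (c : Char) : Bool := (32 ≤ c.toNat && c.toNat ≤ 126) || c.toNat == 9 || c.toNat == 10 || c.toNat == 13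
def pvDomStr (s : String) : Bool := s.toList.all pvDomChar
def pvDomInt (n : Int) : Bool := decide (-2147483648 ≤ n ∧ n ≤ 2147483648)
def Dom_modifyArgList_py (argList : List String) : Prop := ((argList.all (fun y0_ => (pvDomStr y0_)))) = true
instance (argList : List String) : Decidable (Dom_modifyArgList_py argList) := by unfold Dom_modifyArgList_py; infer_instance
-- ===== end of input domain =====

-- B replaces A's two-pass splitter (collect comma indexes, then slice) by one streaming
-- bracket-depth pass, and A's dict/flag/max accumulation plus in-place substitution loop by a
-- placeholder pair list that is validated and then used to rebuild the output by comprehension.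
-- Equality is about the return value only (neither version mutates its caller's list).

-- ===== PORT A =====
-- enumerate loop of phase (1): index, bracket counter, collected split indexes; none = ParameterException
def pyScan : List Char → Int → Int → List Int → Option (List Int)
  | [], _, _, acc => some acc
  | c :: rest, i, bc, acc =>
    let bc' := if c = '(' then bc + 1 else if c = ')' then bc - 1 else bc
    let acc' := if c = ',' ∧ bc' = 0 then acc ++ [i] else acc
    if bc' < 0 then none else pyScan rest (i + 1) bc' acc'

-- split_string_at_indexes: string slices are PySem.List.slice on the char list (exact)
def pySsai (s : List Char) : List Int → Int → List (List Char) → List (List Char)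
  | [], prev, subs => subs ++ [PySem.List.slice s (some prev) none]
  | idx :: rest, prev, subs => pySsai s rest (idx + 1) (subs ++ [PySem.List.slice s (some prev) (some idx)])

-- phase (1): split the last argument at top-level commas; none = ParameterException
def pyStep1 (argList : List String) : Option (List String) :=
  if 0 < argList.length then
    let lastArg := PySem.List.pyGetD argList (-1) ""   -- argList[-1]; in range: the list is nonempty
    if lastArg.toList.contains ',' then                -- ',' in last_arg (single char: membership)
      match pyScan lastArg.toList 0 0 [] with
      | none => none
      | some idxs =>
        let endArgsList := (pySsai lastArg.toList idxs 0 []).map String.ofList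
        some (endArgsList.foldl (fun acc arg => if arg ≠ "" then acc ++ [arg] else acc)
              (PySem.List.slice argList none (some (-1))))
    else some argList
  else some argList

-- phase (2): build insertDict/replaceArg/highestKey; none = IndexError (arg[0]) or ParameterException
def pyPh2 : List String → Int → PySem.Dict Int Int → Bool → Int → Option (PySem.Dict Int Int × Bool × Int)
  | [], _, dict, r, h => some (dict, r, h)
  | arg :: rest, i, dict, r, h =>
    match PySem.List.pyGet? arg.toList 0 with          -- arg[0]; none = IndexError
    | none => none
    | some c0 =>
      if c0 = '%' then
        let num := PySem.List.slice arg.toList (some 1) none   -- arg[1:]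
        if PySem.Chars.strIsdigit num then
          let number := (PySem.Int.ofChars? num).getD 0        -- int(number): parses, num is all digits
          if dict.contains number then none
          else
            let dict' := dict.insert number i
            if number < 0 then none
            else pyPh2 rest (i + 1) dict' true (if h < number then number else h)
        else none
      else pyPh2 rest (i + 1) dict r h

-- phase (4): for argIndex, insertIndex in insertDict.items(): argList[insertIndex] = insertList[argIndex]
def pyPh4 : List (Int × Int) → List String → List String → Option (List String)
  | [], _, cur => some cur
  | (argIndex, insertIndex) :: rest, insertList, cur =>
    match PySem.List.pyGet? insertList argIndex with   -- none = IndexError → ParameterException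
    | none => none
    | some v =>
      match PySem.List.pyIdx? cur.length insertIndex with  -- index of the list assignment
      | none => none
      | some j => pyPh4 rest insertList (cur.set j v)

-- phases (2)-(4) on the already-split list
def pyRest (L : List String) : List String :=
  match pyPh2 L 0 ⟨[]⟩ false 0 with
  | none => []
  | some (insertDict, replaceArg, highestKey) =>
    if replaceArg = false then L
    else if (insertDict.size : Int) ≠ highestKey + 1 then []
    else if ((L.length : Int) - 1) * 2 < highestKey then []
    else
      let splitIndex : Int := (L.length : Int) - (highestKey + 1)
      let insertList := PySem.List.slice L (some splitIndex) none
      match pyPh4 insertDict.items insertList (PySem.List.slice L none (some splitIndex)) with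
      | none => []
      | some res => res

def modifyArgList_py (argList : List String) : List String :=
  match pyStep1 argList with
  | none => []
  | some L => pyRest L

-- ===== PORT B =====
-- streaming top-level-comma splitter (one pass, current buffer + depth); none = ParameterException
def altSplit : List Char → Int → List Char → List (List Char) → Option (List (List Char))
  | [], _, buf, segs => some (segs ++ [buf])
  | c :: rest, depth, buf, segs =>
    if c = ',' ∧ depth = 0 then altSplit rest depth [] (segs ++ [buf])
    else if c = '(' then altSplit rest (depth + 1) (buf ++ [c]) segs
    else if c = ')' then
      if depth - 1 < 0 then none
      else altSplit rest (depth - 1) (buf ++ [c]) segs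
    else altSplit rest depth (buf ++ [c]) segs

-- the pairs loop: (number, position) per placeholder; none = IndexError (arg[0]) or ParameterException
def altPairs : List (Int × String) → Option (List (Int × Int))
  | [] => some []
  | (i, arg) :: rest =>
    match PySem.List.pyGet? arg.toList 0 with
    | none => none
    | some c0 =>
      if c0 = '%' then
        let num := PySem.List.slice arg.toList (some 1) none
        if PySem.Chars.strIsdigit num then
          (altPairs rest).map (fun ps => ((PySem.Int.ofChars? num).getD 0, i) :: ps)
        else none
      else altPairs rest

-- everything after the split: validate the pairs, then rebuild the head by comprehension
def altRest (L : List String) : List String :=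
  match altPairs (PySem.List.enumerate L 0) with
  | none => []
  | some pairs =>
    if pairs = [] then L
    else
      let nums := pairs.map (·.1)
      if (PySem.Set.ofList nums).length ≠ nums.length then []   -- len(set(nums)) != len(nums)
      else
        match PySem.List.max? nums (fun n => n) with
        | none => []   -- unreachable: pairs ≠ []
        | some highest =>
          if (nums.length : Int) ≠ highest + 1 then []
          else if ((L.length : Int) - 1) * 2 < highest then []
          else
            let split : Int := (L.length : Int) - (highest + 1)
            let tail := PySem.List.slice L (some split) none
            let posToNum : PySem.Dict Int Int := pairs.foldl (fun d p => d.insert p.2 p.1) ⟨[]⟩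
            (PySem.List.pyRange 0 split 1).map fun i =>
              match posToNum.get? i with
              | some n => PySem.List.pyGetD tail n ""     -- in range: 0 ≤ n ≤ highest < len(tail)
              | none => PySem.List.pyGetD L i ""          -- in range: 0 ≤ i < split ≤ len(L)

def modifyArgList_py_alt (argList : List String) : List String :=
  if 0 < argList.length ∧ (PySem.List.pyGetD argList (-1) "").toList.contains ',' then
    match altSplit (PySem.List.pyGetD argList (-1) "").toList 0 [] [] with
    | none => []
    | some segs =>
      altRest (PySem.List.slice argList none (some (-1)) ++ (segs.map String.ofList).filter (fun s => s ≠ ""))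
  else altRest argList

-- ===== PRECONDITION & SPEC =====
-- the segments of the last argument between its top-level commas (first component: current segment)
def pvSplit : List Char → Int → List Char × List (List Char)
  | [], _ => ([], [])
  | c :: rest, d =>
    if c = ',' ∧ d = 0 then
      let p := pvSplit rest d
      ([], p.1 :: p.2)
    else
      let p := pvSplit rest (if c = '(' then d + 1 else if c = ')' then d - 1 else d)
      (c :: p.1, p.2)

def pvSegs (cs : List Char) : List (List Char) := (pvSplit cs 0).1 :: (pvSplit cs 0).2

-- the argument list after phase (1)
def pvEff (argList : List String) : List String :=
  if argList = [] then argList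
  else if (argList.getLastD "").toList.contains ',' then
    argList.dropLast ++ ((pvSegs (argList.getLastD "").toList).map String.ofList).filter (fun s => s ≠ "")
  else argList

-- the (placeholder number, position) pairs of the effective list, in order
def pvPairs : List String → Int → List (Int × Int)
  | [], _ => []
  | a :: rest, i =>
    match a.toList with
    | [] => pvPairs rest (i + 1)
    | c :: num =>
      if c = '%' then
        if PySem.Chars.strIsdigit num then ((PySem.Int.ofChars? num).getD 0, i) :: pvPairs rest (i + 1)
        else pvPairs rest (i + 1)
      else pvPairs rest (i + 1)

def pvNums (L : List String) : List Int := (pvPairs L 0).map (·.1)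

-- no prefix closes more brackets than it opened (otherwise A raises ParameterException)
def pvBalanced (cs : List Char) : Prop :=
  ∀ n ∈ List.range (cs.length + 1), (cs.take n).count ')' ≤ (cs.take n).count '('

def pvDigitOK (a : String) : Bool :=
  match a.toList with
  | [] => true
  | c :: num => if c = '%' then PySem.Chars.strIsdigit num else true

-- Pre_ is exactly the set of inputs on which A returns normally: brackets of the last argument
-- never go negative, every argument of the effective list is nonempty (arg[0] would raise
-- IndexError), every '%'-argument carries digits, the placeholder numbers are exactly
-- 0..count-1 without duplicates, they fit the argument count, and every placeholder sits left
-- of the substitution tail (otherwise A raises ParameterException).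
def Pre_modifyArgList_py (argList : List String) : Prop :=
  (argList ≠ [] → (argList.getLastD "").toList.contains ',' = true → pvBalanced (argList.getLastD "").toList)
  ∧ (∀ a ∈ pvEff argList, a ≠ "")
  ∧ (∀ a ∈ pvEff argList, pvDigitOK a = true)
  ∧ (pvNums (pvEff argList)).Nodup
  ∧ (∀ n ∈ pvNums (pvEff argList), 0 ≤ n ∧ n < ((pvNums (pvEff argList)).length : Int))
  ∧ (∀ k ∈ List.range (pvNums (pvEff argList)).length, (k : Int) ∈ pvNums (pvEff argList))
  ∧ (pvPairs (pvEff argList) 0 ≠ [] →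
      ((pvNums (pvEff argList)).length : Int) - 1 ≤ 2 * (((pvEff argList).length : Int) - 1)
      ∧ ∀ p ∈ pvPairs (pvEff argList) 0, p.2 + ((pvNums (pvEff argList)).length : Int) < ((pvEff argList).length : Int))

instance (argList : List String) : Decidable (Pre_modifyArgList_py argList) := by
  unfold Pre_modifyArgList_py pvBalanced; infer_instance

def pvWitness_modifyArgList_py : List String := ["prog", "%0", "va,lue"]

def Spec_modifyArgList_py (argList : List String) (out : List String) : Prop :=
  out = modifyArgList_py_alt argList

instance (argList : List String) (out : List String) : Decidable (Spec_modifyArgList_py argList out) := by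
  unfold Spec_modifyArgList_py; infer_instance

-- ===== CLAIM (what is proved, stated in full; the proofs are below) =====
def Claim_equal_modifyArgList_py : Prop :=
  ∀ (argList : List String), Dom_modifyArgList_py argList → Pre_modifyArgList_py argList →
    Spec_modifyArgList_py argList (modifyArgList_py argList)

-- ===== LEMMAS AND PROOFS =====

-- depth-threaded form of pvBalanced used by the inductions
def pvOkB : List Char → Int → Bool
  | [], _ => true
  | c :: rest, d =>
    let d' := if c = '(' then d + 1 else if c = ')' then d - 1 else d
    decide (0 ≤ d') && pvOkB rest d'

theorem bal_okB : ∀ (cs : List Char) (d : Int), 0 ≤ d →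
    (∀ n ∈ List.range (cs.length + 1), (((cs.take n).count ')' : Int)) ≤ ((cs.take n).count '(' : Int) + d) →
    pvOkB cs d = true := by
  intro cs
  induction cs with
  | nil => intro d hd _; simp [pvOkB]
  | cons c rest ih =>
    intro d hd hbal
    have h1 := hbal 1 (by simp)
    simp only [List.take_succ_cons, List.take_zero, List.count_cons, List.count_nil] at h1
    by_cases hc1 : c = '('
    · subst hc1
      simp only [pvOkB, Bool.and_eq_true, decide_eq_true_eq]
      refine ⟨by simp; omega, ih (d+1) (by omega) ?_⟩
      intro n hn
      have h2 := hbal (n+1) (by simp at hn ⊢; omega)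
      simp only [List.take_succ_cons, List.count_cons] at h2
      simp at h2
      omega
    · by_cases hc2 : c = ')'
      · subst hc2
        simp [hc1] at h1
        simp only [pvOkB, Bool.and_eq_true, decide_eq_true_eq]
        have hne : ¬(')' = '(') := by decide
        simp only [hne, if_false, if_pos rfl]
        refine ⟨by omega, ih (d-1) (by omega) ?_⟩
        intro n hn
        have h2 := hbal (n+1) (by simp at hn ⊢; omega)
        simp only [List.take_succ_cons, List.count_cons] at h2
        simp [hc1] at h2
        omega
      · simp only [pvOkB, Bool.and_eq_true, decide_eq_true_eq, hc1, hc2, if_false]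
        refine ⟨hd, ih d hd ?_⟩
        intro n hn
        have h2 := hbal (n+1) (by simp at hn ⊢; omega)
        simp only [List.take_succ_cons, List.count_cons] at h2
        simp [hc1, hc2] at h2
        exact h2


theorem scan_acc : ∀ (cs : List Char) (i bc : Int) (acc : List Int),
    pyScan cs i bc acc = (pyScan cs i bc []).map (acc ++ ·) := by
  intro cs
  induction cs with
  | nil => intro i bc acc; simp [pyScan]
  | cons c rest ih =>
    intro i bc acc
    simp only [pyScan]
    generalize (if c = '(' then bc + 1 else if c = ')' then bc - 1 else bc) = d'
    split_ifs with h1 h2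
    · simp
    · rw [ih (i+1) d' (acc ++ [i]), ih (i+1) d' ([] ++ [i])]
      cases pyScan rest (i+1) d' [] <;> simp
    · rw [ih (i+1) d' acc]


theorem ssai_acc : ∀ (idxs : List Int) (s : List Char) (prev : Int) (subs : List (List Char)),
    pySsai s idxs prev subs = subs ++ pySsai s idxs prev [] := by
  intro idxs
  induction idxs with
  | nil => intro s prev subs; simp [pySsai]
  | cons idx rest ih =>
    intro s prev subs
    simp only [pySsai]
    rw [ih s (idx+1) (subs ++ _), ih s (idx+1) ([] ++ _)]
    simp


theorem take_succ_of_drop_cons : ∀ (l : List Char) (n : Nat) (c : Char) (r : List Char),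
    l.drop n = c :: r → l.take (n + 1) = l.take n ++ [c] := by
  intro l n c r h
  have hn : n < l.length := by
    by_contra hh
    simp [List.drop_eq_nil_of_le (Nat.le_of_not_lt hh)] at h
  have hg : l[n]? = some c := by
    rw [List.getElem?_eq_getElem hn]
    have := congrArg List.head? h
    simpa [List.head?_drop, List.getElem?_eq_getElem hn] using this
  rw [List.take_add_one, hg]
  rfl


theorem scan_ssai : ∀ (cs : List Char) (k prev : Nat) (d : Int) (F : List Char),
    0 ≤ d → prev ≤ k → F.drop k = cs → pvOkB cs d = true →
    ∃ t, pyScan cs (k : Int) d [] = some t ∧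
      pySsai F t (prev : Int) [] = ((F.drop prev).take (k - prev) ++ (pvSplit cs d).1) :: (pvSplit cs d).2 := by
  intro cs
  induction cs with
  | nil =>
    intro k prev d F hd hpk hdrop _
    refine ⟨[], by simp [pyScan], ?_⟩
    have hlen : F.length ≤ k := by
      have := congrArg List.length hdrop
      simp at this
      omega
    simp only [pySsai, pvSplit, List.nil_append]
    rw [PySem.List.slice_from F (by positivity)]
    have : (F.drop prev).take (k - prev) = F.drop prev := by
      apply List.take_of_length_le
      simp
      omega
    simp [this]
  | cons c rest ih =>
    intro k prev d F hd hpk hdrop hok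
    simp only [pvOkB, Bool.and_eq_true, decide_eq_true_eq] at hok
    obtain ⟨hd', hok'⟩ := hok
    have hdrop' : F.drop (k + 1) = rest := by
      have : F.drop (k+1) = (F.drop k).drop 1 := by rw [List.drop_drop]
      rw [this, hdrop]
      rfl
    by_cases hsplit : c = ',' ∧ d = 0
    · obtain ⟨hc, hdz⟩ := hsplit
      subst hc hdz
      have hcomma : ¬(',' = '(') := by decide
      have hcomma2 : ¬(',' = ')') := by decide
      simp only [hcomma, hcomma2, if_false] at hd' hok' ⊢
      obtain ⟨t', h1', h2'⟩ := ih (k+1) (k+1) 0 F le_rfl le_rfl hdrop' hok'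
      refine ⟨(k : Int) :: t', ?_, ?_⟩
      · simp only [pyScan, hcomma, hcomma2, if_false, and_true, if_pos rfl]
        norm_num
        rw [scan_acc]
        have hcast : (k : Int) + 1 = ((k + 1 : Nat) : Int) := by push_cast; ring
        rw [hcast, h1']
        rfl
      · simp only [pySsai, pvSplit, and_true, if_pos rfl, List.nil_append]
        rw [ssai_acc]
        have hcast : (k : Int) + 1 = ((k + 1 : Nat) : Int) := by push_cast; ring
        rw [hcast, h2']
        simp at h2' ⊢
        rw [PySem.List.slice_natCast]
    · have hcond : ¬(c = ',' ∧ (if c = '(' then d + 1 else if c = ')' then d - 1 else d) = 0) := by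
        intro ⟨hc, hval⟩
        subst hc
        simp at hval
        exact hsplit ⟨rfl, by simpa using hval⟩
      obtain ⟨t, h1, h2⟩ := ih (k+1) prev _ F hd' (by omega) hdrop' hok'
      refine ⟨t, ?_, ?_⟩
      · simp only [pyScan, hcond, if_false, if_neg (by omega : ¬(if c = '(' then d + 1 else if c = ')' then d - 1 else d) < 0)]
        have hcast : (k : Int) + 1 = ((k + 1 : Nat) : Int) := by push_cast; ring
        rw [hcast, h1]
      · simp only [pvSplit, if_neg hsplit]
        rw [h2]
        have htake : (F.drop prev).take ((k + 1) - prev) = (F.drop prev).take (k - prev) ++ [c] := by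
          have hdd : (F.drop prev).drop (k - prev) = c :: rest := by
            rw [List.drop_drop]
            rw [(by omega : prev + (k - prev) = k)]
            exact hdrop
          have := take_succ_of_drop_cons (F.drop prev) (k - prev) c rest hdd
          rw [(by omega : (k + 1) - prev = (k - prev) + 1)]
          exact this
        rw [htake]
        simp


theorem alt_split_eq : ∀ (cs : List Char) (d : Int) (buf : List Char) (segs : List (List Char)),
    0 ≤ d → pvOkB cs d = true →
    altSplit cs d buf segs = some (segs ++ (buf ++ (pvSplit cs d).1) :: (pvSplit cs d).2) := by
  intro cs
  induction cs with
  | nil => intro d buf segs _ _; simp [altSplit, pvSplit]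
  | cons c rest ih =>
    intro d buf segs hd hok
    simp only [pvOkB, Bool.and_eq_true, decide_eq_true_eq] at hok
    obtain ⟨hd', hok'⟩ := hok
    by_cases hsplit : c = ',' ∧ d = 0
    · obtain ⟨hc, hdz⟩ := hsplit
      subst hc hdz
      simp only [altSplit, pvSplit, and_true, if_pos rfl]
      have hcomma : ¬(',' = '(') := by decide
      have hcomma2 : ¬(',' = ')') := by decide
      simp only [hcomma, hcomma2, if_false] at hd' hok'
      rw [ih 0 [] (segs ++ [buf]) le_rfl hok']
      simp
    · simp only [altSplit, pvSplit, if_neg hsplit]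
      by_cases hc1 : c = '('
      · subst hc1
        simp only [if_pos rfl] at hd' hok' ⊢
        rw [ih (d+1) (buf ++ ['(']) segs hd' hok']
        simp
      · by_cases hc2 : c = ')'
        · subst hc2
          simp only [reduceIte] at hd' hok' ⊢
          simp only [if_neg hc1] at hd' hok' ⊢
          rw [if_neg (show ¬ d - 1 < 0 by omega), ih (d-1) (buf ++ [')']) segs hd' hok']
          simp
        · simp only [if_neg hc1, if_neg hc2] at hd' hok' ⊢
          rw [ih d (buf ++ [c]) segs hd hok']
          simp


theorem pvPairs_bounds : ∀ (L : List String) (i : Int) (p : Int × Int),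
    p ∈ pvPairs L i → i ≤ p.2 ∧ p.2 < i + L.length := by
  intro L
  induction L with
  | nil => intro i p hp; simp [pvPairs] at hp
  | cons a rest ih =>
    intro i p hp
    have step : ∀ q : Int × Int, q ∈ pvPairs rest (i + 1) → i ≤ q.2 ∧ q.2 < i + (a :: rest).length := by
      intro q hq
      have := ih (i + 1) q hq
      simp only [List.length_cons]
      push_cast
      omega
    simp only [pvPairs] at hp
    split at hp
    · exact step p hp
    · split_ifs at hp with hc hdig
      · rcases List.mem_cons.mp hp with hh | ht
        · subst hh; refine ⟨le_rfl, ?_⟩; simp only [List.length_cons]; push_cast; omega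
        · exact step p ht
      · exact step p hp
      · exact step p hp


theorem pvPairs_idx_nodup : ∀ (L : List String) (i : Int), ((pvPairs L i).map (·.2)).Nodup := by
  intro L
  induction L with
  | nil => intro i; simp [pvPairs]
  | cons a rest ih =>
    intro i
    simp only [pvPairs]
    split
    · exact ih (i + 1)
    · split_ifs with hc hdig
      · simp only [List.map_cons, List.nodup_cons]
        refine ⟨?_, ih (i + 1)⟩
        intro hmem
        rcases List.mem_map.mp hmem with ⟨q, hq, hq2⟩
        have := pvPairs_bounds rest (i + 1) q hq
        omega
      · exact ih (i + 1)
      · exact ih (i + 1)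


theorem ph2_go : ∀ (L : List String) (i : Int) (dict : PySem.Dict Int Int) (r : Bool) (h : Int),
    (∀ a ∈ L, a ≠ "") →
    (∀ a ∈ L, pvDigitOK a = true) →
    (∀ n ∈ (pvPairs L i).map (·.1), 0 ≤ n) →
    ((pvPairs L i).map (·.1)).Nodup →
    (∀ n ∈ (pvPairs L i).map (·.1), dict.contains n = false) →
    pyPh2 L i dict r h = some ((pvPairs L i).foldl (fun d p => d.insert p.1 p.2) dict,
      (r || decide (pvPairs L i ≠ [])),
      ((pvPairs L i).map (·.1)).foldl (fun h n => if h < n then n else h) h) := by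
  intro L
  induction L with
  | nil => intro i dict r h _ _ _ _ _; simp [pyPh2, pvPairs]
  | cons a rest ih =>
    intro i dict r h h1 h2 h3 h4 h5
    simp only [pyPh2]
    rcases hl : a.toList with _ | ⟨c, num⟩
    · exact absurd (String.toList_eq_nil_iff.mp hl) (h1 a (by simp))
    · simp only [pvPairs, hl] at h3 h4 h5 ⊢
      rw [PySem.List.pyGet?_zero_cons, PySem.List.slice_from_one]
      simp only [List.tail_cons]
      by_cases hc : c = '%'
      · have hdig : PySem.Chars.strIsdigit num = true := by
          have := h2 a (by simp)
          unfold pvDigitOK at this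
          rw [hl] at this
          simpa [hc] using this
        subst hc
        simp only [if_pos rfl, hdig, if_true] at h3 h4 h5 ⊢
        set number := (PySem.Int.ofChars? num).getD 0 with hnum
        have hcont : dict.contains number = false := h5 number (by simp)
        rw [hcont]
        simp only [Bool.false_eq_true, if_false]
        rw [if_neg (by have := h3 number (by simp); omega : ¬ number < 0)]
        have hnodup := h4
        simp only [List.map_cons, List.nodup_cons] at hnodup
        rw [ih (i+1) (dict.insert number i) true (if h < number then number else h)
            (fun x hx => h1 x (by simp [hx])) (fun x hx => h2 x (by simp [hx]))
            (fun n hn => h3 n (by simp [hn]))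
            hnodup.2
            (fun n hn => by
              rw [PySem.Dict.contains_insert]
              have hne : n ≠ number := fun he => hnodup.1 (he ▸ hn)
              simp [hne, h5 n (by simp [hn])])]
        simp
      · simp only [hc, if_neg hc, if_false] at h3 h4 h5 ⊢
        exact ih (i+1) dict r h (fun x hx => h1 x (by simp [hx])) (fun x hx => h2 x (by simp [hx])) h3 h4 h5


theorem altPairs_eq : ∀ (L : List String) (i : Int),
    (∀ a ∈ L, a ≠ "") → (∀ a ∈ L, pvDigitOK a = true) →
    altPairs (PySem.List.enumerate L i) = some (pvPairs L i) := by
  intro L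
  induction L with
  | nil => intro i _ _; simp [altPairs, pvPairs, PySem.List.enumerate]
  | cons a rest ih =>
    intro i h1 h2
    rw [PySem.List.enumerate_cons]
    simp only [altPairs, pvPairs]
    rcases hl : a.toList with _ | ⟨c, num⟩
    · exact absurd (String.toList_eq_nil_iff.mp hl) (h1 a (by simp))
    · rw [PySem.List.pyGet?_zero_cons, PySem.List.slice_from_one]
      simp only [List.tail_cons]
      by_cases hc : c = '%'
      · have hdig : PySem.Chars.strIsdigit num = true := by
          have := h2 a (by simp)
          unfold pvDigitOK at this
          rw [hl] at this
          simpa [hc] using this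
        rw [if_pos hc, if_pos hdig, if_pos hdig]
        rw [ih (i + 1) (fun x hx => h1 x (by simp [hx])) (fun x hx => h2 x (by simp [hx]))]
        simp [hc, hdig]
      · rw [if_neg hc, if_neg hc]
        exact ih (i + 1) (fun x hx => h1 x (by simp [hx])) (fun x hx => h2 x (by simp [hx]))


theorem ph4_some : ∀ (ps : List (Int × Int)) (tailL cur : List String),
    (∀ p ∈ ps, 0 ≤ p.1 ∧ p.1 < (tailL.length : Int) ∧ 0 ≤ p.2 ∧ p.2 < (cur.length : Int)) →
    pyPh4 ps tailL cur = some (ps.foldl (fun cur p => cur.set p.2.toNat (tailL.getD p.1.toNat "")) cur) := by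
  intro ps
  induction ps with
  | nil => intro tailL cur _; rfl
  | cons p rest ih =>
    intro tailL cur hb
    obtain ⟨hb1, hb2, hb3, hb4⟩ := hb p (by simp)
    obtain ⟨a, b⟩ := p
    simp only [pyPh4]
    rw [PySem.List.pyGet?_of_nonneg _ hb1]
    rw [show tailL[a.toNat]? = some (tailL.getD a.toNat "") from by
      rw [List.getElem?_eq_getElem (by simp at hb2 ⊢; omega), List.getD_eq_getElem _ _ (by simp at hb2 ⊢; omega)]]
    simp only []
    rw [show PySem.List.pyIdx? cur.length b = some b.toNat from by
      unfold PySem.List.pyIdx?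
      rw [if_pos hb3, if_pos hb4]]
    simp only []
    rw [ih tailL (cur.set b.toNat (tailL.getD a.toNat ""))
        (fun q hq => by have := hb q (by simp [hq]); simpa using this)]
    simp only [List.foldl_cons]


theorem foldl_set_getElem? : ∀ (ps : List (Int × Int)) (tailL cur : List String) (j : Nat),
    (∀ p ∈ ps, 0 ≤ p.2 ∧ p.2 < (cur.length : Int)) → ((ps.map (·.2)).Nodup) →
    (ps.foldl (fun cur p => cur.set p.2.toNat (tailL.getD p.1.toNat "")) cur)[j]? =
      match ps.find? (fun p => p.2 == (j : Int)) with
      | some p => if j < cur.length then some (tailL.getD p.1.toNat "") else none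
      | none => cur[j]? := by
  intro ps
  induction ps with
  | nil => intro tailL cur j _ _; simp
  | cons p rest ih =>
    intro tailL cur j hb hn
    obtain ⟨hb3, hb4⟩ := hb p (by simp)
    simp only [List.map_cons, List.nodup_cons] at hn
    simp only [List.foldl_cons, List.find?]
    by_cases hpj : p.2 = (j : Int)
    · rw [show (p.2 == (j : Int)) = true from by simp [hpj]]
      have hjn : p.2.toNat = j := by omega
      rw [ih tailL _ j (fun q hq => by have := hb q (by simp [hq]); simpa using this) hn.2]
      have hfind : rest.find? (fun q => q.2 == (j : Int)) = none := by
        apply List.find?_eq_none.mpr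
        intro q hq
        simp only [beq_iff_eq]
        intro he
        exact hn.1 (by rw [← hpj] at he; exact (List.mem_map.mpr ⟨q, hq, he⟩))
      rw [hfind]
      simp only [hjn]
      rw [List.getElem?_set_self' ]
      rw [if_pos (by omega), List.getElem?_eq_getElem (by omega)]
      simp
    · rw [show (p.2 == (j : Int)) = false from by simp [hpj]]
      rw [ih tailL _ j (fun q hq => by have := hb q (by simp [hq]); simpa using this) hn.2]
      have hset : (cur.set p.2.toNat (tailL.getD p.1.toNat ""))[j]? = cur[j]? := by
        apply List.getElem?_set_ne
        omega
      rw [hset]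
      have hlen : (cur.set p.2.toNat (tailL.getD p.1.toNat "")).length = cur.length := by simp
      rw [hlen]


theorem get?_swap_map : ∀ (ps : List (Int × Int)) (j : Int),
    (PySem.Dict.mk (ps.map fun p => (p.2, p.1))).get? j = ((ps.find? (fun p => p.2 == j)).map (·.1)) := by
  intro ps
  induction ps with
  | nil => intro j; simp [PySem.Dict.get?]
  | cons p rest ih =>
    intro j
    simp only [List.map_cons, PySem.Dict.get?_mk_cons, List.find?]
    by_cases hpj : p.2 = j
    · rw [show (p.2 == j) = true from by simp [hpj]]
      simp
    · rw [show (p.2 == j) = false from by simp [hpj]]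
      simp only [Bool.false_eq_true, if_false]
      exact ih j


theorem ite_max_eq : (fun (h n : Int) => if h < n then n else h) = max := by
  funext a b
  by_cases hab : a < b
  · simp [hab, max_eq_right (le_of_lt hab)]
  · simp [hab, max_eq_left (by omega : b ≤ a)]

theorem hk_eq : ∀ (nums : List Int), nums ≠ [] →
    (∀ n ∈ nums, 0 ≤ n ∧ n < (nums.length : Int)) →
    (((nums.length : Int) - 1) ∈ nums) →
    nums.foldl (fun h n => if h < n then n else h) 0 = (nums.length : Int) - 1 := by
  intro nums hne hb hm
  rw [ite_max_eq]
  have h1 := (PySem.List.le_foldl_max nums 0).2 _ hm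
  have h2 := PySem.List.foldl_max_mem nums 0
  have hlen : 1 ≤ nums.length := List.length_pos_of_ne_nil hne
  rcases h2 with h2 | h2
  · omega
  · have := (hb _ h2).2
    omega

theorem max?_eq : ∀ (nums : List Int), nums ≠ [] →
    (∀ n ∈ nums, 0 ≤ n ∧ n < (nums.length : Int)) →
    (((nums.length : Int) - 1) ∈ nums) →
    PySem.List.max? nums (fun n => n) = some ((nums.length : Int) - 1) := by
  intro nums hne hb hm
  rcases nums with - | ⟨n0, t⟩
  · exact absurd rfl hne
  · rw [PySem.List.max?_id_cons]
    congr 1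
    have hub := PySem.List.le_foldl_max t n0
    have hmem := PySem.List.foldl_max_mem t n0
    have hlo : (((n0 :: t).length : Int) - 1) ≤ t.foldl max n0 := by
      rcases List.mem_cons.mp hm with hh | ht
      · rw [hh]; exact hub.1
      · exact hub.2 _ ht
    have hhi : t.foldl max n0 < ((n0 :: t).length : Int) := by
      rcases hmem with h | h
      · rw [h]; exact (hb n0 (by simp)).2
      · exact (hb _ (by simp [h])).2
    omega

theorem rest_eq : ∀ (L : List String),
    (∀ a ∈ L, a ≠ "") →
    (∀ a ∈ L, pvDigitOK a = true) →
    (pvNums L).Nodup →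
    (∀ n ∈ pvNums L, 0 ≤ n ∧ n < ((pvNums L).length : Int)) →
    (∀ k ∈ List.range (pvNums L).length, (k : Int) ∈ pvNums L) →
    (pvPairs L 0 ≠ [] →
      ((pvNums L).length : Int) - 1 ≤ 2 * ((L.length : Int) - 1)
      ∧ ∀ p ∈ pvPairs L 0, p.2 + ((pvNums L).length : Int) < (L.length : Int)) →
    pyRest L = altRest L := by
  intro L h1 h2 h3 h4 h5 h6
  simp only [pvNums] at h3 h4 h5 h6
  unfold pyRest altRest
  rw [altPairs_eq L 0 h1 h2]
  rw [ph2_go L 0 ⟨[]⟩ false 0 h1 h2 (fun n hn => (h4 n hn).1) h3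
    (fun n hn => by simp [PySem.Dict.contains_mk])]
  simp only [Bool.false_or]
  by_cases hPnil : pvPairs L 0 = []
  · simp [hPnil]
  · rw [if_neg hPnil]
    have hrT : decide (pvPairs L 0 ≠ []) = true := by simp [hPnil]
    rw [hrT, if_neg (by simp : ¬ (true = false))]
    -- shared quantities
    have hitems : ((pvPairs L 0).foldl (fun d p => d.insert p.1 p.2) (⟨[]⟩ : PySem.Dict Int Int)).items
        = pvPairs L 0 := by
      rw [PySem.Dict.items_foldl_insert_fresh (pvPairs L 0) (fun p => p.1) (fun p => p.2) ⟨[]⟩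
        (fun a _ => by simp [PySem.Dict.contains_mk]) h3]
      simp
    have hsize : (((pvPairs L 0).foldl (fun d p => d.insert p.1 p.2) (⟨[]⟩ : PySem.Dict Int Int)).size : Int)
        = ((pvPairs L 0).length : Int) := by
      unfold PySem.Dict.size
      rw [hitems]
    have hNnum : ((pvPairs L 0).map (·.1)).length = (pvPairs L 0).length := by simp
    have hnumsne : (pvPairs L 0).map (·.1) ≠ [] := by simp [hPnil]
    have hmem : (((((pvPairs L 0).map (·.1)).length : Int)) - 1) ∈ (pvPairs L 0).map (·.1) := by
      have hlen : 1 ≤ ((pvPairs L 0).map (·.1)).length := List.length_pos_of_ne_nil hnumsne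
      have := h5 (((pvPairs L 0).map (·.1)).length - 1) (by simp [List.mem_range]; omega)
      have hcast : (((((pvPairs L 0).map (·.1)).length - 1 : Nat)) : Int)
          = ((((pvPairs L 0).map (·.1)).length : Int)) - 1 := by push_cast [hlen]; ring
      rwa [hcast] at this
    have hM := hk_eq ((pvPairs L 0).map (·.1)) hnumsne h4 hmem
    rw [hM, hsize]
    rw [if_neg (by simp [hNnum] : ¬ ((pvPairs L 0).length : Int) ≠ ((pvPairs L 0).map (·.1)).length - 1 + 1)]
    -- B-side checks
    rw [PySem.Set.ofList_eq_self_of_nodup _ h3]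
    rw [if_neg (by simp : ¬ ((pvPairs L 0).map (·.1)).length ≠ ((pvPairs L 0).map (·.1)).length)]
    rw [max?_eq ((pvPairs L 0).map (·.1)) hnumsne h4 hmem]
    simp only []
    rw [if_neg (by simp : ¬ ((((pvPairs L 0).map (·.1)).length : Int)) ≠ ((((pvPairs L 0).map (·.1)).length : Int)) - 1 + 1)]
    obtain ⟨hchk2, hpos⟩ := h6 hPnil
    have hchk2' : ¬ ((L.length : Int) - 1) * 2 < (((pvPairs L 0).map (·.1)).length : Int) - 1 := by omega
    simp only [if_neg hchk2']
    have hone : (((pvPairs L 0).map (·.1)).length : Int) - 1 + 1 = (((pvPairs L 0).map (·.1)).length : Int) := by ring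
    rw [hone, hNnum]
    obtain ⟨p0, hp0⟩ := List.exists_mem_of_ne_nil _ hPnil
    have hb0 := pvPairs_bounds L 0 p0 hp0
    have hp0b := hpos p0 hp0
    rw [hNnum] at hp0b
    have hNlt : ((pvPairs L 0).length : Int) < (L.length : Int) := by omega
    have hNleN : (pvPairs L 0).length ≤ L.length := by exact_mod_cast le_of_lt hNlt
    rw [show ((L.length : Int) - ((pvPairs L 0).length : Int)) = ((L.length - (pvPairs L 0).length : Nat) : Int) from by
      rw [Nat.cast_sub hNleN]]
    rw [PySem.List.slice_from_natCast, PySem.List.slice_to_natCast, PySem.List.pyRange_zero_natCast]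
    rw [hitems]
    have hlenTake : (L.take (L.length - (pvPairs L 0).length)).length = L.length - (pvPairs L 0).length := by
      simp only [List.length_take]
      omega
    have hlenDrop : (L.drop (L.length - (pvPairs L 0).length)).length = (pvPairs L 0).length := by
      simp only [List.length_drop]
      omega
    rw [ph4_some (pvPairs L 0) (L.drop (L.length - (pvPairs L 0).length)) (L.take (L.length - (pvPairs L 0).length))
      (fun p hp => by
        have h4p := h4 p.1 (List.mem_map.mpr ⟨p, hp, rfl⟩)
        rw [hNnum] at h4p
        have hbp := pvPairs_bounds L 0 p hp
        have hpp := hpos p hp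
        rw [hNnum] at hpp
        rw [hlenTake, hlenDrop]
        refine ⟨h4p.1, h4p.2, by omega, ?_⟩
        rw [Nat.cast_sub hNleN]
        omega)]
    simp only []
    rw [show (List.foldl (fun d p => d.insert p.2 p.1) (⟨[]⟩ : PySem.Dict Int Int) (pvPairs L 0))
        = PySem.Dict.mk ((pvPairs L 0).map fun p => (p.2, p.1)) from by
      apply PySem.Dict.ext
      rw [PySem.Dict.items_foldl_insert_fresh (pvPairs L 0) (fun p => p.2) (fun p => p.1) ⟨[]⟩
        (fun a _ => by simp [PySem.Dict.contains_mk]) (pvPairs_idx_nodup L 0)]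
      simp]
    apply List.ext_getElem?
    intro j
    rw [foldl_set_getElem? (pvPairs L 0) (L.drop (L.length - (pvPairs L 0).length))
      (L.take (L.length - (pvPairs L 0).length)) j
      (fun p hp => by
        have hbp := pvPairs_bounds L 0 p hp
        have hpp := hpos p hp
        rw [hNnum] at hpp
        rw [hlenTake]
        refine ⟨by omega, ?_⟩
        rw [Nat.cast_sub hNleN]
        omega)
      (pvPairs_idx_nodup L 0)]
    rw [List.getElem?_map, List.getElem?_map]
    by_cases hj : j < L.length - (pvPairs L 0).length
    · rw [List.getElem?_range hj]
      simp only [Option.map_some]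
      rw [get?_swap_map]
      have hjL : j < L.length := by omega
      rcases hfind : List.find? (fun p => p.2 == (j : Int)) (pvPairs L 0) with - | p
      · simp only [hfind, Option.map_none]
        rw [List.getElem?_take_of_lt hj, List.getElem?_eq_getElem hjL]
        rw [PySem.List.pyGetD_natCast, List.getD_eq_getElem _ _ hjL]
      · simp only [hfind, Option.map_some]
        rw [if_pos (by rw [hlenTake]; exact hj)]
        have hpmem := List.mem_of_find?_eq_some hfind
        have h4p := h4 p.1 (List.mem_map.mpr ⟨p, hpmem, rfl⟩)
        rw [hNnum] at h4p
        have hlt : p.1.toNat < (L.drop (L.length - (pvPairs L 0).length)).length := by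
          rw [hlenDrop]; omega
        rw [PySem.List.pyGetD_eq_getElem _ _ h4p.1 (by rw [hlenDrop]; exact_mod_cast h4p.2)]
        rw [List.getD_eq_getElem _ _ hlt]
    · rw [List.getElem?_eq_none (by simp only [List.length_range]; omega : (List.range (L.length - (pvPairs L 0).length)).length ≤ j)]
      simp only [Option.map_none]
      rcases hfind : List.find? (fun p => p.2 == (j : Int)) (pvPairs L 0) with - | p
      · simp only [hfind]
        apply List.getElem?_eq_none
        rw [hlenTake]
        omega
      · simp only [hfind]
        rw [if_neg (by rw [hlenTake]; exact hj)]

theorem step1_eq : ∀ (argList : List String), Pre_modifyArgList_py argList →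
    pyStep1 argList = some (pvEff argList) := by
  intro argList hPre
  obtain ⟨hbal, -⟩ := hPre
  unfold pyStep1 pvEff
  by_cases hnil : argList = []
  · subst hnil; simp
  · have hlen : 0 < argList.length := List.length_pos_of_ne_nil hnil
    rw [if_pos hlen, if_neg hnil]
    have hlast : PySem.List.pyGetD argList (-1) "" = argList.getLastD "" := by
      rw [PySem.List.pyGetD_neg_one _ _ hnil, List.getLastD_eq_getLast?,
        List.getLast?_eq_some_getLast hnil]
      rfl
    rw [hlast]
    by_cases hc : (argList.getLastD "").toList.contains ','
    · rw [if_pos hc, if_pos hc]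
      have hok : pvOkB (argList.getLastD "").toList 0 = true := by
        apply bal_okB _ 0 le_rfl
        intro n hn
        have := hbal hnil hc n hn
        push_cast
        omega
      obtain ⟨t, h1, h2⟩ := scan_ssai (argList.getLastD "").toList 0 0 0
        ((argList.getLastD "").toList) le_rfl le_rfl (by simp) hok
      rw [Nat.cast_zero] at h1 h2
      rw [h1]
      simp only [List.drop_zero, Nat.sub_zero, List.take_zero, List.nil_append] at h2
      simp only [h2]
      rw [PySem.List.slice_to_neg_one, PySem.List.foldl_append_ite_eq_filter]
      rfl
    · rw [if_neg hc, if_neg hc]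

theorem alt_main_eq : ∀ (argList : List String), Pre_modifyArgList_py argList →
    modifyArgList_py_alt argList = altRest (pvEff argList) := by
  intro argList hPre
  obtain ⟨hbal, -⟩ := hPre
  unfold modifyArgList_py_alt pvEff
  by_cases hnil : argList = []
  · subst hnil; simp
  · have hlen : 0 < argList.length := List.length_pos_of_ne_nil hnil
    have hlast : PySem.List.pyGetD argList (-1) "" = argList.getLastD "" := by
      rw [PySem.List.pyGetD_neg_one _ _ hnil, List.getLastD_eq_getLast?,
        List.getLast?_eq_some_getLast hnil]
      rfl
    rw [hlast, if_neg hnil]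
    by_cases hc : (argList.getLastD "").toList.contains ','
    · rw [if_pos ⟨hlen, hc⟩, if_pos hc]
      have hok : pvOkB (argList.getLastD "").toList 0 = true := by
        apply bal_okB _ 0 le_rfl
        intro n hn
        have := hbal hnil hc n hn
        push_cast
        omega
      rw [alt_split_eq _ 0 [] [] le_rfl hok]
      simp only [List.nil_append]
      rw [PySem.List.slice_to_neg_one]
      rfl
    · rw [if_neg (by intro hand; exact hc hand.2), if_neg hc]

-- ===== VERDICT (by name: the statement is the Claim_ definition above) =====
theorem modifyArgList_py_spec : Claim_equal_modifyArgList_py := by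
  intro argList _ hPre
  unfold Spec_modifyArgList_py
  obtain ⟨h1, h2, h3, h4, h5, h6, h7⟩ := hPre
  rw [alt_main_eq argList ⟨h1, h2, h3, h4, h5, h6, h7⟩]
  unfold modifyArgList_py
  rw [step1_eq argList ⟨h1, h2, h3, h4, h5, h6, h7⟩]
  exact rest_eq (pvEff argList) h2 h3 h4 h5 h6 h7
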